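-- pv_equiv track=rewrite | github.com/LeeChanghoJJang/Algorithm-Study | 11~20회차/14회차/programmers_258712_가장많이받은선물/programmers_258712_최지우.py | solution
-- ===== SOURCE A (Python) =====
-- def solution(friends, gifts):
--     answer = 0
--     n = len(friends)
--     gift_point = [0] * n
--     arr = [[0] * n for _ in range(n)]
--     friend_dict = {name: idx for idx, name in enumerate(friends)}
--
--     for gift in gifts:
--         from_, to = gift.split()
--         gift_point[friend_dict[from_]] += 1
--         gift_point[friend_dict[to]] -= 1
--
--         arr[friend_dict[from_]][friend_dict[to]] += 1
--
--     for base in friends: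
--         cnt = 0
--         for target in friends:
--             b, t = friend_dict[base], friend_dict[target]
--             if b == t:
--                 continue
--
--             if arr[b][t] > arr[t][b]:
--                 cnt += 1
--                 continue
--
--             if arr[b][t] == arr[t][b]:
--                 if gift_point[b] > gift_point[t]:
--                     cnt += 1
--         answer = max(answer, cnt)
--     return answer
-- ===== SOURCE B (Python) =====
-- def solution(friends, gifts):
--     score = {f: 0 for f in friends}
--     direct = {}
--     partners = {f: set() for f in friends}
--     for gift in gifts:
--         a, b = gift.split()
--         score[a] += 1
--         score[b] -= 1
--         direct[(a, b)] = direct.get((a, b), 0) + 1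
--         partners[a].add(b)
--         partners[b].add(a)
--     # baseline: with no direct-gift evidence, x out-gifts exactly those with a
--     # strictly smaller net score; rank[v] = how many scores are strictly below v
--     svals = sorted(score.values())
--     rank = {}
--     for i, v in enumerate(svals):
--         if v not in rank:
--             rank[v] = i
--     best = 0
--     for x in friends:
--         w = rank[score[x]]
--         # correct the baseline only on pairs that actually exchanged gifts
--         for y in partners[x]:
--             if y != x:
--                 ab = direct.get((x, y), 0)
--                 ba = direct.get((y, x), 0)
--                 if ab != ba:
--                     w += (1 if ab > ba else 0) - (1 if score[x] > score[y] else 0)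
--         best = max(best, w)
--     return best
-- ===== Notes on version B (the rewrite author's own statement) =====
-- stated objective: alternative
-- what changed: B drops A's n x n matrix and all-pairs comparison loop: it sorts the net gift scores once so rank[score[x]] gives x's tie-break wins against everybody in O(1), then corrects that baseline only on the pairs that actually exchanged gifts (an adjacency set per person built from the gift list), so the per-person work is proportional to that person's gift partners instead of to n.
-- outside the precondition, e.g. on solution(['a', 'b', 'b'], ['a b']): A returns 2, B returns 1; on solution(['a'], ['a']): A raises ValueError, B raises ValueError
import Mathlib
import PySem

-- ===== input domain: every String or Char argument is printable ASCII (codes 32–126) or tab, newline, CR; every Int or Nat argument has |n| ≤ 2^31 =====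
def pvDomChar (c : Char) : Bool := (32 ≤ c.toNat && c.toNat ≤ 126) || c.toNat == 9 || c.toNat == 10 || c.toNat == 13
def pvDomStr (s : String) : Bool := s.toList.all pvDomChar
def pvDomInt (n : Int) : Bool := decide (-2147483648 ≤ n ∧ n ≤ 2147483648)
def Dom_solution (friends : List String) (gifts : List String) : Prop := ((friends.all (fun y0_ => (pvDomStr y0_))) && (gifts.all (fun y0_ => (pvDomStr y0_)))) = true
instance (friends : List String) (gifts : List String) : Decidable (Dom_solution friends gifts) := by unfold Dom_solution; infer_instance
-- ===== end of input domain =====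

-- B replaces A's n×n matrix and all-pairs comparison by a sorted ranking of the net scores
-- (the tie-break baseline) corrected only on pairs that actually exchanged gifts (objective: alternative).

-- ===== PORT A =====
-- A's dict lookups are ported with getD 0 and its list writes with List.modify at .toNat: exact under
-- Pre_solution, where every gift name is a key of friend_dict (so the indices exist and are ≥ 0).
def pyAFdict (friends : List String) : PySem.Dict String Int :=
  (PySem.List.enumerate friends 0).foldl (fun d p => d.insert p.2 p.1) PySem.Dict.empty

-- the body of A's 'for gift in gifts' loop (state: (gift_point, arr))
def pyAStep (fd : PySem.Dict String Int) (st : List Int × List (List Int)) (gift : String) :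
    List Int × List (List Int) :=
  match PySem.Str.split₀ gift with
  | [from_, to_] =>
    let bi := fd.getD from_ 0
    let ti := fd.getD to_ 0
    ((st.1.modify bi.toNat (· + 1)).modify ti.toNat (· - 1),
     st.2.modify bi.toNat (fun row => row.modify ti.toNat (· + 1)))
  | _ => st

def solution (friends : List String) (gifts : List String) : Int :=
  let n := friends.length
  let friend_dict := pyAFdict friends
  let st := gifts.foldl (pyAStep friend_dict)
      (List.replicate n 0, List.replicate n (List.replicate n 0))
  let gift_point := st.1
  let arr := st.2
  friends.foldl (fun answer base =>
    let cnt := friends.foldl (fun cnt target =>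
      let b := friend_dict.getD base 0
      let t := friend_dict.getD target 0
      if b == t then cnt
      else if PySem.List.pyGetD (PySem.List.pyGetD arr b []) t 0 >
              PySem.List.pyGetD (PySem.List.pyGetD arr t []) b 0 then cnt + 1
      else if PySem.List.pyGetD (PySem.List.pyGetD arr b []) t 0 =
              PySem.List.pyGetD (PySem.List.pyGetD arr t []) b 0 then
        (if PySem.List.pyGetD gift_point b 0 > PySem.List.pyGetD gift_point t 0 then cnt + 1 else cnt)
      else cnt) (0 : Int)
    max answer cnt) 0

-- ===== PORT B =====
-- the body of B's 'for gift in gifts' loop (state: (score, direct, partners))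
def pyBStep
    (st : PySem.Dict String Int × PySem.Dict (String × String) Int ×
          PySem.Dict String (PySem.Set String)) (gift : String) :
    PySem.Dict String Int × PySem.Dict (String × String) Int ×
          PySem.Dict String (PySem.Set String) :=
  match PySem.Str.split₀ gift with
  | [a, b] =>
    ((st.1.modify a 0 (· + 1)).modify b 0 (· - 1),
     st.2.1.modify (a, b) 0 (· + 1),
     (st.2.2.modify a PySem.Set.empty (fun s => PySem.Set.add s b)).modify b PySem.Set.empty
       (fun s => PySem.Set.add s a))
  | _ => st

-- the body of B's 'for i, v in enumerate(svals)' loop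
def pyRankStep (d : PySem.Dict Int Int) (p : Int × Int) : PySem.Dict Int Int :=
  if d.contains p.2 then d else d.insert p.2 p.1

-- the body of B's 'for y in partners[x]' loop
def pyBInner (score : PySem.Dict String Int) (direct : PySem.Dict (String × String) Int)
    (x : String) (w : Int) (y : String) : Int :=
  if y ≠ x then
    let ab := direct.getD (x, y) 0
    let ba := direct.getD (y, x) 0
    if ab ≠ ba then
      w + (if ab > ba then 1 else 0) - (if score.getD x 0 > score.getD y 0 then 1 else 0)
    else w
  else w

def solution_alt (friends : List String) (gifts : List String) : Int :=
  let score0 : PySem.Dict String Int :=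
    friends.foldl (fun d f => d.insert f 0) PySem.Dict.empty
  let partners0 : PySem.Dict String (PySem.Set String) :=
    friends.foldl (fun d f => d.insert f PySem.Set.empty) PySem.Dict.empty
  let st := gifts.foldl pyBStep (score0, PySem.Dict.empty, partners0)
  let svals := PySem.List.sorted st.1.values (fun v => v) false
  let rank := (PySem.List.enumerate svals 0).foldl pyRankStep PySem.Dict.empty
  friends.foldl (fun best x =>
    max best ((st.2.2.getD x PySem.Set.empty).foldl (pyBInner st.1 st.2.1 x)
      (rank.getD (st.1.getD x 0) 0))) 0

-- ===== PRECONDITION & SPEC =====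
-- Pre_ excludes (a) gifts on which A raises (split() not giving exactly two tokens: ValueError;
-- a token that is not a friend's name: KeyError) and (b) duplicate friend names, a defensible
-- corner where A's last-wins dict indexing (duplicates collapse to one matrix slot yet are
-- counted twice as targets) and B's name-keyed counting are both accidental.
def Pre_solution (friends : List String) (gifts : List String) : Prop :=
  friends.Nodup ∧
  ∀ g ∈ gifts, (PySem.Str.split₀ g).length = 2 ∧ ∀ x ∈ PySem.Str.split₀ g, x ∈ friends
instance (friends : List String) (gifts : List String) : Decidable (Pre_solution friends gifts) := by
  unfold Pre_solution; infer_instance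
def pvWitness_solution : List String × List String :=
  (["muzi", "ryan", "frodo"], ["muzi ryan", "ryan frodo", "muzi ryan", "frodo muzi"])
def Spec_solution (friends : List String) (gifts : List String) (out : Int) : Prop := out = solution_alt friends gifts
instance (friends : List String) (gifts : List String) (out : Int) : Decidable (Spec_solution friends gifts out) := by unfold Spec_solution; infer_instance

-- ===== CLAIM (what is proved, stated in full; the proofs are below) =====
def Claim_equal_solution : Prop := ∀ (friends : List String) (gifts : List String), Dom_solution friends gifts → Pre_solution friends gifts → Spec_solution friends gifts (solution friends gifts)

-- ===== LEMMAS AND PROOFS =====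

def pvC (gifts : List String) (x y : String) : Int :=
  (gifts.countP (fun g => PySem.Str.split₀ g == [x, y]) : Int)

def pvFrom (x : String) (g : String) : Bool := ((PySem.Str.split₀ g).head? == some x)

def pvTo (x : String) (g : String) : Bool := ((PySem.Str.split₀ g)[1]? == some x)

theorem listGetD_modify {α : Type} (l : List α) (i : Nat) (f : α → α) (j : Nat) (d : α) :
    (l.modify i f).getD j d = if i = j ∧ j < l.length then f (l.getD j d) else l.getD j d := by
  simp only [List.getD_eq_getElem?_getD, List.getElem?_modify]
  split_ifs <;> simp_all <;> omega

theorem fd_notmem (l : List (Int × String)) (d : PySem.Dict String Int) (x : String) (v : Int)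
    (h : x ∉ l.map (·.2)) :
    (l.foldl (fun d p => d.insert p.2 p.1) d).getD x v = d.getD x v := by
  induction l generalizing d with
  | nil => rfl
  | cons p t ih =>
    simp only [List.map_cons, List.mem_cons, not_or] at h
    rw [List.foldl_cons, ih _ (by simpa using h.2)]
    exact PySem.Dict.getD_insert_of_ne _ _ _ h.1

theorem fd_getD_aux (friends : List String) (hnd : friends.Nodup) :
    ∀ (s : Int) (d : PySem.Dict String Int) (k : Nat), (hk : k < friends.length) →
    ((PySem.List.enumerate friends s).foldl (fun d p => d.insert p.2 p.1) d).getD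
      (friends[k]) 0 = s + k := by
  induction friends with
  | nil => intro s d k hk; simp at hk
  | cons x t ih =>
    intro s d k hk
    rw [PySem.List.enumerate_cons, List.foldl_cons]
    match k with
    | 0 =>
      have hx : x ∉ (PySem.List.enumerate t (s+1)).map (·.2) := by
        rw [PySem.List.map_snd_enumerate]; exact (List.nodup_cons.mp hnd).1
      simp [fd_notmem _ _ _ _ hx, PySem.Dict.getD_insert_self]
    | k + 1 =>
      have := ih (List.nodup_cons.mp hnd).2 (s+1) (d.insert x s) k (by simpa using hk)
      simpa [this] using by push_cast; ring

theorem fd_getD (friends : List String) (hnd : friends.Nodup) (k : Nat) (hk : k < friends.length) :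
    (pyAFdict friends).getD (friends[k]) 0 = k := by
  simpa using fd_getD_aux friends hnd 0 PySem.Dict.empty k hk

theorem A_state (friends : List String) (hnd : friends.Nodup) :
    ∀ (gs : List String)
      (_ : ∀ g ∈ gs, (PySem.Str.split₀ g).length = 2 ∧ ∀ x ∈ PySem.Str.split₀ g, x ∈ friends)
      (gp : List Int) (arr : List (List Int))
      (_ : gp.length = friends.length) (_ : arr.length = friends.length)
      (_ : ∀ r ∈ arr, r.length = friends.length),
      (gs.foldl (pyAStep (pyAFdict friends)) (gp, arr)).1.length = friends.length ∧
      (gs.foldl (pyAStep (pyAFdict friends)) (gp, arr)).2.length = friends.length ∧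
      (∀ r ∈ (gs.foldl (pyAStep (pyAFdict friends)) (gp, arr)).2, r.length = friends.length) ∧
      (∀ k, (hk : k < friends.length) →
        (gs.foldl (pyAStep (pyAFdict friends)) (gp, arr)).1.getD k 0
          = gp.getD k 0 + (gs.countP (pvFrom friends[k]) : Int)
            - (gs.countP (pvTo friends[k]) : Int)) ∧
      (∀ i j, (hi : i < friends.length) → (hj : j < friends.length) →
        ((gs.foldl (pyAStep (pyAFdict friends)) (gp, arr)).2.getD i []).getD j 0
          = (arr.getD i []).getD j 0 + pvC gs friends[i] friends[j]) := by
  intro gs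
  induction gs with
  | nil =>
    intro _ gp arr hgp harr hrow
    refine ⟨hgp, harr, hrow, ?_, ?_⟩ <;> intros <;> simp [pvC]
  | cons g gs ih =>
    intro hg gp arr hgp harr hrow
    obtain ⟨hlen2, hmem⟩ := hg g (by simp)
    obtain ⟨a, b, hsplit⟩ : ∃ a b, PySem.Str.split₀ g = [a, b] := by
      match h : PySem.Str.split₀ g with
      | [a, b] => exact ⟨a, b, rfl⟩
      | [] | [_] | _ :: _ :: _ :: _ => simp [h] at hlen2
    obtain ⟨ia, hia, ha⟩ := List.mem_iff_getElem.mp (hmem a (by simp [hsplit]))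
    obtain ⟨ib, hib, hb⟩ := List.mem_iff_getElem.mp (hmem b (by simp [hsplit]))
    have hfda : (pyAFdict friends).getD a 0 = ia := by rw [← ha]; exact fd_getD friends hnd ia hia
    have hfdb : (pyAFdict friends).getD b 0 = ib := by rw [← hb]; exact fd_getD friends hnd ib hib
    have hstep : pyAStep (pyAFdict friends) (gp, arr) g =
        ((gp.modify ia (· + 1)).modify ib (· - 1),
         arr.modify ia (fun row => row.modify ib (· + 1))) := by
      simp [pyAStep, hsplit, hfda, hfdb]
    rw [List.foldl_cons, hstep]
    have hrow' : ∀ r ∈ arr.modify ia (fun row => row.modify ib (· + 1)), r.length = friends.length := by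
      intro r hr
      obtain ⟨j, hj, hrj⟩ := List.mem_iff_getElem.mp hr
      rw [List.getElem_modify] at hrj
      split at hrj
      · subst hrj; simp only [List.length_modify]
        exact hrow _ (List.getElem_mem _)
      · subst hrj; exact hrow _ (List.getElem_mem _)
    obtain ⟨h1, h2, h3, h4, h5⟩ := ih (fun g hg' => hg g (by simp [hg']))
      ((gp.modify ia (· + 1)).modify ib (· - 1))
      (arr.modify ia (fun row => row.modify ib (· + 1)))
      (by simp only [List.length_modify]; exact hgp)
      (by simp only [List.length_modify]; exact harr) hrow'
    refine ⟨h1, h2, h3, ?_, ?_⟩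
    · intro k hk
      rw [h4 k hk]
      have h1d : (friends[ia] = friends[k] ↔ ia = k) := hnd.getElem_inj_iff
      have h2d : (friends[ib] = friends[k] ↔ ib = k) := hnd.getElem_inj_iff
      rw [listGetD_modify, listGetD_modify]
      have hfrom : pvFrom friends[k] g = decide (ia = k) := by
        simp only [pvFrom, hsplit, List.head?_cons]
        rw [← ha, Bool.beq_eq_decide_eq, decide_eq_decide]
        simp [h1d]
      have hto : pvTo friends[k] g = decide (ib = k) := by
        simp only [pvTo, hsplit]
        rw [← hb, show ([a, friends[ib]] : List String)[1]? = some friends[ib] from rfl,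
          Bool.beq_eq_decide_eq, decide_eq_decide]
        simp [h2d]
      rw [List.countP_cons, List.countP_cons, hfrom, hto]
      simp only [List.length_modify, hgp]
      simp only [decide_eq_true_eq]
      by_cases e1 : ia = k <;> by_cases e2 : ib = k <;>
        simp only [e1, e2, hk, and_true, true_and] <;>
        first
        | (split_ifs <;> push_cast <;> omega)
        | (push_cast <;> omega)
    · intro i j hi hj
      rw [h5 i j hi hj, listGetD_modify]
      have hCg : pvC (g :: gs) friends[i] friends[j]
          = pvC gs friends[i] friends[j] + if ia = i ∧ ib = j then 1 else 0 := by
        simp only [pvC, List.countP_cons, hsplit]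
        have heq : ([a, b] == [friends[i], friends[j]]) = decide (ia = i ∧ ib = j) := by
          rw [← ha, ← hb, Bool.beq_eq_decide_eq, decide_eq_decide]
          simp [hnd.getElem_inj_iff]
        rw [heq]
        simp only [decide_eq_true_eq]
        split_ifs <;> push_cast <;> omega
      rw [hCg]
      by_cases e1 : ia = i
      · subst e1
        rw [if_pos ⟨rfl, by omega⟩, listGetD_modify]
        have hrl : (arr.getD ia []).length = friends.length := by
          rw [List.getD_eq_getElem _ _ (by omega : ia < arr.length)]
          exact hrow _ (List.getElem_mem _)
        by_cases e2 : ib = j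
        · subst e2; rw [if_pos ⟨rfl, by omega⟩, if_pos ⟨rfl, rfl⟩]; ring
        · rw [if_neg (by tauto), if_neg (by tauto)]; ring
      · rw [if_neg (by tauto), if_neg (by tauto)]; ring

def pvGP (gifts : List String) (x : String) : Int :=
  (gifts.countP (pvFrom x) : Int) - (gifts.countP (pvTo x) : Int)

def pvBeat (gifts : List String) (x y : String) : Bool :=
  decide (pvC gifts x y > pvC gifts y x) ||
  (decide (pvC gifts x y = pvC gifts y x) && decide (pvGP gifts x > pvGP gifts y))

def pvCnt (friends gifts : List String) (base : String) : Int :=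
  (friends.countP (fun t => !(t == base) && pvBeat gifts base t) : Int)

def pvRef (friends gifts : List String) : Int :=
  friends.foldl (fun a base => max a (pvCnt friends gifts base)) 0

theorem A_eq_ref (friends gifts : List String)
    (hnd : friends.Nodup)
    (hg : ∀ g ∈ gifts, (PySem.Str.split₀ g).length = 2 ∧ ∀ x ∈ PySem.Str.split₀ g, x ∈ friends) :
    solution friends gifts = pvRef friends gifts := by
  obtain ⟨h1, h2, h3, h4, h5⟩ := A_state friends hnd gifts hg
    (List.replicate friends.length 0)
    (List.replicate friends.length (List.replicate friends.length 0))
    (by simp) (by simp)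
    (by intro r hr; rw [List.eq_of_mem_replicate hr]; simp)
  simp only [solution]
  unfold pvRef
  apply PySem.List.foldl_congr_mem
  intro acc base hbase
  obtain ⟨kb, hkb, hab⟩ := List.mem_iff_getElem.mp hbase
  congr 1
  have hinner : ∀ (cnt : Int), ∀ target ∈ friends,
      (let b := (pyAFdict friends).getD base 0
       let t := (pyAFdict friends).getD target 0
       if b == t then cnt
       else if PySem.List.pyGetD (PySem.List.pyGetD (gifts.foldl (pyAStep (pyAFdict friends))
              (List.replicate friends.length 0, List.replicate friends.length (List.replicate friends.length 0))).2 b []) t 0 >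
              PySem.List.pyGetD (PySem.List.pyGetD (gifts.foldl (pyAStep (pyAFdict friends))
              (List.replicate friends.length 0, List.replicate friends.length (List.replicate friends.length 0))).2 t []) b 0 then cnt + 1
       else if PySem.List.pyGetD (PySem.List.pyGetD (gifts.foldl (pyAStep (pyAFdict friends))
              (List.replicate friends.length 0, List.replicate friends.length (List.replicate friends.length 0))).2 b []) t 0 =
              PySem.List.pyGetD (PySem.List.pyGetD (gifts.foldl (pyAStep (pyAFdict friends))
              (List.replicate friends.length 0, List.replicate friends.length (List.replicate friends.length 0))).2 t []) b 0 then
         (if PySem.List.pyGetD (gifts.foldl (pyAStep (pyAFdict friends))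
              (List.replicate friends.length 0, List.replicate friends.length (List.replicate friends.length 0))).1 b 0 >
             PySem.List.pyGetD (gifts.foldl (pyAStep (pyAFdict friends))
              (List.replicate friends.length 0, List.replicate friends.length (List.replicate friends.length 0))).1 t 0 then cnt + 1 else cnt)
       else cnt)
      = if (!(target == base) && pvBeat gifts base target) then cnt + 1 else cnt := by
    intro cnt target htarget
    obtain ⟨kt, hkt, hat⟩ := List.mem_iff_getElem.mp htarget
    have hfdb : (pyAFdict friends).getD base 0 = (kb : Int) := by
      rw [← hab]; exact fd_getD friends hnd kb hkb
    have hfdt : (pyAFdict friends).getD target 0 = (kt : Int) := by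
      rw [← hat]; exact fd_getD friends hnd kt hkt
    have harr : ∀ (i j : Nat) (hi : i < friends.length) (hj : j < friends.length),
        PySem.List.pyGetD (PySem.List.pyGetD (gifts.foldl (pyAStep (pyAFdict friends))
          (List.replicate friends.length 0, List.replicate friends.length (List.replicate friends.length 0))).2 (i : Int) []) (j : Int) 0
        = pvC gifts friends[i] friends[j] := by
      intro i j hi hj
      rw [PySem.List.pyGetD_natCast, PySem.List.pyGetD_natCast, h5 i j hi hj,
        show (List.replicate friends.length (List.replicate friends.length (0:Int))).getD i []
            = List.replicate friends.length (0:Int) from by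
          rw [List.getD_eq_getElem _ _ (by simpa using hi), List.getElem_replicate]]
      simp [List.getD_eq_getElem?_getD, List.getElem?_replicate]
      split <;> simp
    have hgp : ∀ (i : Nat) (hi : i < friends.length),
        PySem.List.pyGetD (gifts.foldl (pyAStep (pyAFdict friends))
          (List.replicate friends.length 0, List.replicate friends.length (List.replicate friends.length 0))).1 (i : Int) 0
        = pvGP gifts friends[i] := by
      intro i hi
      rw [PySem.List.pyGetD_natCast, h4 i hi,
        List.getD_eq_getElem _ _ (by simpa using hi), List.getElem_replicate]
      simp [pvGP]
    simp only [hfdb, hfdt, harr kb kt hkb hkt, harr kt kb hkt hkb, hgp kb hkb, hgp kt hkt,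
      hab, hat]
    have hbeq : ((kb : Int) == (kt : Int)) = (target == base) := by
      rw [Bool.beq_eq_decide_eq, Bool.beq_eq_decide_eq, decide_eq_decide, Nat.cast_inj,
        ← hab, ← hat, eq_comm]
      exact (hnd.getElem_inj_iff).symm
    rw [hbeq]
    by_cases hbt : target = base
    · simp [hbt]
    · simp only [hbt, if_false, beq_iff_eq, decide_false, Bool.not_false, Bool.true_and]
      unfold pvBeat
      split_ifs with c1 c2 c3 <;>
        simp_all [pvBeat, not_lt] <;> omega
  rw [PySem.List.foldl_congr_mem friends _ _ 0 hinner, PySem.List.foldl_if_add_one]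
  simp [pvCnt]

-- ---- B-side lemmas ----

theorem getD_foldl_insert0 (l : List String) (d : PySem.Dict String Int)
    (h : ∀ x, d.getD x 0 = 0) : ∀ x, (l.foldl (fun d n => d.insert n 0) d).getD x 0 = 0 := by
  induction l generalizing d with
  | nil => exact h
  | cons y t ih =>
    rw [List.foldl_cons]
    refine ih _ (fun x => ?_)
    by_cases hx : x = y
    · subst hx; rw [PySem.Dict.getD_insert_self]
    · rw [PySem.Dict.getD_insert_of_ne _ _ _ hx]; exact h x

theorem keys_insert_any {ν : Type} (friends : List String) (hnd : friends.Nodup) (v : ν) :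
    (friends.foldl (fun d name => d.insert name v) (PySem.Dict.empty : PySem.Dict String ν)).keys
      = friends := by
  rw [PySem.Dict.keys_foldl_insert friends (fun _ _ => v) PySem.Dict.empty]
  have : (PySem.Dict.empty : PySem.Dict String ν).keys = [] := rfl
  rw [this]
  show PySem.Set.ofList friends = friends
  exact PySem.Set.ofList_eq_self_of_nodup friends hnd

theorem values_eq_map (items : List (String × Int)) (h : (items.map (·.1)).Nodup) :
    (PySem.Dict.mk items).values
      = (items.map (·.1)).map (fun k => (PySem.Dict.mk items).getD k 0) := by
  induction items with
  | nil => rfl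
  | cons p t ih =>
    obtain ⟨k, v⟩ := p
    simp only [List.map_cons] at h ⊢
    rw [PySem.Dict.values_mk]
    simp only [List.map_cons]
    congr 1
    · simp [PySem.Dict.getD, PySem.Dict.get?_mk_cons]
    · rw [← PySem.Dict.values_mk, ih (List.nodup_cons.mp h).2]
      apply List.map_congr_left
      intro x hx
      have hxk : ¬ (k == x) = true := by
        simp only [beq_iff_eq]
        intro he; exact (List.nodup_cons.mp h).1 (he ▸ hx)
      simp [PySem.Dict.getD, PySem.Dict.get?_mk_cons, hxk]

theorem dict_values_getD (d : PySem.Dict String Int) (h : d.keys.Nodup) :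
    d.values = d.keys.map (fun k => d.getD k 0) := by
  have : d = PySem.Dict.mk d.items := rfl
  rw [this]
  have hk : d.keys = d.items.map (·.1) := by rw [this, PySem.Dict.keys_mk]
  rw [hk] at h ⊢
  exact values_eq_map d.items h

theorem mem_getD_modify_add (d : PySem.Dict String (PySem.Set String)) (k v x y : String) :
    y ∈ (d.modify k PySem.Set.empty (fun s => PySem.Set.add s v)).getD x PySem.Set.empty
      ↔ y ∈ d.getD x PySem.Set.empty ∨ (x = k ∧ y = v) := by
  rw [PySem.Dict.getD_modify]
  split_ifs with h
  · subst h; rw [PySem.Set.mem_add]; tauto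
  · tauto

theorem nodup_modify_add (d : PySem.Dict String (PySem.Set String)) (k v : String)
    (hall : ∀ z, (d.getD z PySem.Set.empty).Nodup) :
    ∀ z, ((d.modify k PySem.Set.empty (fun s => PySem.Set.add s v)).getD z
      PySem.Set.empty).Nodup := by
  intro z
  rw [PySem.Dict.getD_modify]
  split_ifs with h
  · exact PySem.Set.nodup_add _ _ (hall k)
  · exact hall z

-- the gift fold: score = net points, direct = pair counter, partners = gift neighbours
theorem B_state : ∀ (gs : List String)
    (_ : ∀ g ∈ gs, (PySem.Str.split₀ g).length = 2)
    (st : PySem.Dict String Int × PySem.Dict (String × String) Int ×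
          PySem.Dict String (PySem.Set String)),
    (∀ x : String, (gs.foldl pyBStep st).1.getD x 0
        = st.1.getD x 0 + (gs.countP (pvFrom x) : Int) - (gs.countP (pvTo x) : Int)) ∧
    (∀ x y : String, (gs.foldl pyBStep st).2.1.getD (x, y) 0
        = st.2.1.getD (x, y) 0 + pvC gs x y) ∧
    (∀ x y : String, y ∈ (gs.foldl pyBStep st).2.2.getD x PySem.Set.empty
        ↔ y ∈ st.2.2.getD x PySem.Set.empty ∨ pvC gs x y > 0 ∨ pvC gs y x > 0) ∧
    ((∀ x : String, (st.2.2.getD x PySem.Set.empty).Nodup) →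
        ∀ x : String, ((gs.foldl pyBStep st).2.2.getD x PySem.Set.empty).Nodup) ∧
    ((∀ g ∈ gs, ∀ t ∈ PySem.Str.split₀ g, t ∈ st.1.keys) →
        (gs.foldl pyBStep st).1.keys = st.1.keys) := by
  intro gs
  induction gs with
  | nil =>
    intro _ st
    refine ⟨fun x => by simp, fun x y => by simp [pvC], fun x y => by simp [pvC], fun h => h,
      fun _ => rfl⟩
  | cons g gs ih =>
    intro hg st
    obtain ⟨a, b, hsplit⟩ : ∃ a b, PySem.Str.split₀ g = [a, b] := by
      have hlen2 := hg g (by simp)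
      match h : PySem.Str.split₀ g with
      | [a, b] => exact ⟨a, b, rfl⟩
      | [] | [_] | _ :: _ :: _ :: _ => simp [h] at hlen2
    have hstep : pyBStep st g =
        ((st.1.modify a 0 (· + 1)).modify b 0 (· - 1),
         st.2.1.modify (a, b) 0 (· + 1),
         (st.2.2.modify a PySem.Set.empty (fun s => PySem.Set.add s b)).modify b PySem.Set.empty
           (fun s => PySem.Set.add s a)) := by
      simp [pyBStep, hsplit]
    rw [List.foldl_cons, hstep]
    obtain ⟨ih1, ih2, ih3, ih4, ih5⟩ := ih (fun g hg' => hg g (by simp [hg'])) _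
    refine ⟨?_, ?_, ?_, ?_, ?_⟩
    · intro x
      rw [ih1 x, PySem.Dict.getD_modify, PySem.Dict.getD_modify, PySem.Dict.getD_modify,
        List.countP_cons, List.countP_cons]
      have hf : pvFrom x g = decide (x = a) := by
        simp only [pvFrom, hsplit, List.head?_cons]
        rw [Bool.beq_eq_decide_eq, decide_eq_decide]
        simp [eq_comm]
      have ht : pvTo x g = decide (x = b) := by
        simp only [pvTo, hsplit, show ([a, b] : List String)[1]? = some b from rfl]
        rw [Bool.beq_eq_decide_eq, decide_eq_decide]
        simp [eq_comm]
      rw [hf, ht]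
      simp only [decide_eq_true_eq]
      split_ifs <;> subst_vars <;> first | (push_cast; omega) | simp_all
    · intro x y
      rw [ih2 x y, PySem.Dict.getD_modify]
      simp only [pvC, List.countP_cons, hsplit]
      have : (([a, b] : List String) == [x, y]) = decide ((x, y) = (a, b)) := by
        rw [Bool.beq_eq_decide_eq, decide_eq_decide]
        simp [Prod.ext_iff, eq_comm]
      rw [this]
      simp only [decide_eq_true_eq]
      split_ifs with h1
      · rw [h1]; push_cast; omega
      · push_cast; omega
    · intro x y
      rw [ih3 x y]
      have hC1 : pvC (g :: gs) x y = pvC gs x y + if x = a ∧ y = b then 1 else 0 := by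
        simp only [pvC, List.countP_cons, hsplit]
        have : (([a, b] : List String) == [x, y]) = decide (x = a ∧ y = b) := by
          rw [Bool.beq_eq_decide_eq, decide_eq_decide]
          constructor
          · intro h
            simp only [List.cons.injEq, and_true] at h
            exact ⟨h.1.symm, h.2.symm⟩
          · rintro ⟨rfl, rfl⟩; rfl
        rw [this]; simp only [decide_eq_true_eq]; split_ifs <;> push_cast <;> omega
      have hC2 : pvC (g :: gs) y x = pvC gs y x + if y = a ∧ x = b then 1 else 0 := by
        simp only [pvC, List.countP_cons, hsplit]
        have : (([a, b] : List String) == [y, x]) = decide (y = a ∧ x = b) := by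
          rw [Bool.beq_eq_decide_eq, decide_eq_decide]
          constructor
          · intro h
            simp only [List.cons.injEq, and_true] at h
            exact ⟨h.1.symm, h.2.symm⟩
          · rintro ⟨rfl, rfl⟩; rfl
        rw [this]; simp only [decide_eq_true_eq]; split_ifs <;> push_cast <;> omega
      rw [hC1, hC2, mem_getD_modify_add, mem_getD_modify_add]
      have hCnn : 0 ≤ pvC gs x y := by simp [pvC]
      have hCnn' : 0 ≤ pvC gs y x := by simp [pvC]
      split_ifs with q1 q2 q2
      · have h1 : pvC gs x y + 1 > 0 := by omega
        exact ⟨fun _ => Or.inr (Or.inl h1), fun _ => Or.inl (Or.inl (Or.inr q1))⟩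
      · have h1 : pvC gs x y + 1 > 0 := by omega
        exact ⟨fun _ => Or.inr (Or.inl h1), fun _ => Or.inl (Or.inl (Or.inr q1))⟩
      · have h2 : pvC gs y x + 1 > 0 := by omega
        exact ⟨fun _ => Or.inr (Or.inr h2), fun _ => Or.inl (Or.inr ⟨q2.2, q2.1⟩)⟩
      · simp only [add_zero]
        constructor
        · rintro (((h | h) | h) | h | h)
          · exact Or.inl h
          · exact absurd h q1
          · exact absurd ⟨h.2, h.1⟩ q2
          · exact Or.inr (Or.inl h)
          · exact Or.inr (Or.inr h)
        · rintro (h | h | h)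
          · exact Or.inl (Or.inl (Or.inl h))
          · exact Or.inr (Or.inl h)
          · exact Or.inr (Or.inr h)
    · intro hall
      exact ih4 (nodup_modify_add _ _ _ (nodup_modify_add _ _ _ hall))
    · intro hk
      have hmem := hk g (by simp)
      have ha' : a ∈ st.1.keys := hmem a (by simp [hsplit])
      have hb' : b ∈ ((st.1.modify a 0 (· + 1)) : PySem.Dict String Int).keys := by
        rw [PySem.Dict.keys_modify]
        have : st.1.contains a = true := (PySem.Dict.contains_iff_mem_keys _ _).mpr ha'
        rw [PySem.Dict.keys_insert_of_contains _ _ this]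
        exact hmem b (by simp [hsplit])
      have hkeys : (((st.1.modify a 0 (· + 1)).modify b 0 (· - 1)) : PySem.Dict String Int).keys
          = st.1.keys := by
        rw [PySem.Dict.keys_modify, PySem.Dict.keys_insert_of_contains _ _
          ((PySem.Dict.contains_iff_mem_keys _ _).mpr hb'), PySem.Dict.keys_modify,
          PySem.Dict.keys_insert_of_contains _ _
          ((PySem.Dict.contains_iff_mem_keys _ _).mpr ha')]
      rw [ih5 (by intro g' hg' t ht; rw [hkeys]; exact hk g' (by simp [hg']) t ht), hkeys]

-- the rank fold never overwrites an existing key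
theorem rank_persist (l : List (Int × Int)) (d : PySem.Dict Int Int) (v : Int) (r : Int)
    (h : d.get? v = some r) : (l.foldl pyRankStep d).get? v = some r := by
  induction l generalizing d with
  | nil => exact h
  | cons p t ih =>
    rw [List.foldl_cons]
    apply ih
    unfold pyRankStep
    split_ifs with hc
    · exact h
    · have : p.2 ≠ v := by
        intro he
        rw [he, PySem.Dict.contains_eq_isSome_get?, h] at hc
        simp at hc
      rw [PySem.Dict.get?_insert_of_ne _ _ (fun he => this he.symm)]
      exact h

-- in a ≤-sorted list, the first index recorded for v is the number of elements < v
theorem rank_first : ∀ (s : List Int) (i0 : Int) (d : PySem.Dict Int Int) (v : Int),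
    v ∈ s → d.contains v = false → s.Pairwise (· ≤ ·) →
    ((PySem.List.enumerate s i0).foldl pyRankStep d).getD v 0
      = i0 + (s.countP (fun u => decide (u < v)) : Int) := by
  intro s
  induction s with
  | nil => intro _ _ _ hv; simp at hv
  | cons w t ih =>
    intro i0 d v hv hc hp
    rw [PySem.List.enumerate_cons, List.foldl_cons]
    have hwle : ∀ u ∈ t, w ≤ u := fun u hu => (List.pairwise_cons.mp hp).1 u hu
    by_cases hvw : v = w
    · subst hvw
      have hstep : pyRankStep d (i0, v) = d.insert v i0 := by
        unfold pyRankStep; rw [if_neg (by simp [hc])]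
      rw [hstep]
      have hpers := rank_persist (PySem.List.enumerate t (i0 + 1)) (d.insert v i0) v i0
        (PySem.Dict.get?_insert_self _ _ _)
      rw [PySem.Dict.getD_eq_get?_getD, hpers]
      have hz : (v :: t).countP (fun u => decide (u < v)) = 0 := by
        rw [List.countP_eq_zero]
        intro u hu
        simp only [List.mem_cons] at hu
        rcases hu with rfl | hu
        · simp
        · simpa using not_lt.mpr (hwle u hu)
      rw [hz]; simp
    · have hvt : v ∈ t := by
        rcases List.mem_cons.mp hv with h | h
        · exact absurd h hvw
        · exact h
      have hwv : w < v := lt_of_le_of_ne (hwle v hvt) (fun he => hvw he.symm)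
      have hcount : ((w :: t).countP (fun u => decide (u < v)) : Int)
          = 1 + (t.countP (fun u => decide (u < v)) : Int) := by
        rw [List.countP_cons]
        simp only [decide_eq_true_eq]
        rw [if_pos hwv]; push_cast; ring
      have hrec : ∀ d' : PySem.Dict Int Int, d'.contains v = false →
          ((PySem.List.enumerate t (i0 + 1)).foldl pyRankStep d').getD v 0
            = (i0 + 1) + (t.countP (fun u => decide (u < v)) : Int) :=
        fun d' hc' => ih (i0 + 1) d' v hvt hc' (List.pairwise_cons.mp hp).2
      by_cases hcw : d.contains w = true
      · rw [show pyRankStep d (i0, w) = d from by unfold pyRankStep; simp [hcw],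
          hrec d hc, hcount]
        ring
      · rw [show pyRankStep d (i0, w) = d.insert w i0 from by unfold pyRankStep; simp [hcw]]
        have hcv : (d.insert w i0).contains v = false := by
          rw [PySem.Dict.contains_insert]
          simp only [Bool.or_eq_false_iff]
          exact ⟨by simp only [beq_eq_false_iff_ne, ne_eq]; exact hvw, hc⟩
        rw [hrec _ hcv, hcount]
        ring

-- the partner loop adds direct wins and removes the tie-break credit on unequal pairs
theorem inner_fold (score : PySem.Dict String Int) (direct : PySem.Dict (String × String) Int)
    (gifts : List String) (x : String)
    (hs : ∀ z, score.getD z 0 = pvGP gifts z)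
    (hd : ∀ a b, direct.getD (a, b) 0 = pvC gifts a b) :
    ∀ (ps : List String) (w0 : Int),
    ps.foldl (pyBInner score direct x) w0
      = w0 + (ps.countP (fun y => !(y == x) && !(pvC gifts x y == pvC gifts y x)
              && decide (pvC gifts x y > pvC gifts y x)) : Int)
          - (ps.countP (fun y => !(y == x) && !(pvC gifts x y == pvC gifts y x)
              && decide (pvGP gifts x > pvGP gifts y)) : Int) := by
  intro ps
  induction ps with
  | nil => intro w0; simp
  | cons y t ih =>
    intro w0
    rw [List.foldl_cons, ih, List.countP_cons, List.countP_cons]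
    unfold pyBInner
    simp only [hs, hd]
    by_cases h1 : y = x
    · subst h1; simp
    · rw [if_pos h1]
      by_cases h2 : pvC gifts x y = pvC gifts y x
      · rw [if_neg (by simpa using h2)]
        simp only [h1, h2, beq_iff_eq, decide_false, Bool.not_true, Bool.false_and,
          Bool.and_false, decide_true, Bool.not_false]
        simp
      · rw [if_pos (by simpa using h2)]
        have hxb : (y == x) = false := by simp [h1]
        have hcb : (pvC gifts x y == pvC gifts y x) = false := by simp [h2]
        simp only [hxb, hcb, Bool.not_false, Bool.true_and]
        by_cases h3 : pvC gifts x y > pvC gifts y x <;>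
          by_cases h4 : pvGP gifts x > pvGP gifts y <;>
            simp only [h3, h4, decide_true, decide_false, if_true, if_false] <;>
            push_cast <;> ring
  -- counts stay Nat-cast; the per-element delta is handled by ring

theorem countP_eq_of_nodup {α : Type} [DecidableEq α] (l₁ l₂ : List α) (p : α → Bool)
    (h1 : l₁.Nodup) (h2 : l₂.Nodup) (h : ∀ a, p a = true → (a ∈ l₁ ↔ a ∈ l₂)) :
    l₁.countP p = l₂.countP p := by
  rw [List.countP_eq_length_filter, List.countP_eq_length_filter]
  apply List.Perm.length_eq
  rw [List.perm_ext_iff_of_nodup (h1.filter p) (h2.filter p)]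
  intro a
  simp only [List.mem_filter]
  constructor
  · rintro ⟨ha, hp⟩; exact ⟨(h a hp).mp ha, hp⟩
  · rintro ⟨ha, hp⟩; exact ⟨(h a hp).mpr ha, hp⟩

theorem count_combine (friends : List String) (p q r s : String → Bool)
    (h : ∀ y ∈ friends, (if p y then (1:Int) else 0) + (if q y then 1 else 0)
        - (if r y then 1 else 0) = (if s y then 1 else 0)) :
    (friends.countP p : Int) + (friends.countP q : Int) - (friends.countP r : Int)
      = (friends.countP s : Int) := by
  induction friends with
  | nil => simp
  | cons y t ih =>
    have hy := h y (by simp)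
    have ht := ih (fun z hz => h z (by simp [hz]))
    simp only [List.countP_cons]
    push_cast
    split_ifs at hy ⊢ <;> omega

theorem C_pos_mem (friends gifts : List String)
    (hg : ∀ g ∈ gifts, (PySem.Str.split₀ g).length = 2 ∧ ∀ x ∈ PySem.Str.split₀ g, x ∈ friends)
    (a b : String) (h : pvC gifts a b > 0) : a ∈ friends ∧ b ∈ friends := by
  simp only [pvC] at h
  have : 0 < gifts.countP (fun g => PySem.Str.split₀ g == [a, b]) := by exact_mod_cast h
  obtain ⟨g, hgm, hgp⟩ := List.countP_pos_iff.mp this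
  have hsp : PySem.Str.split₀ g = [a, b] := by simpa using hgp
  exact ⟨(hg g hgm).2 a (by simp [hsp]), (hg g hgm).2 b (by simp [hsp])⟩

-- a dict seeded with empty sets only ever yields the empty set before the gift loop
theorem getD_foldl_insert_empty (l : List String)
    (d : PySem.Dict String (PySem.Set String))
    (h : ∀ x, d.getD x PySem.Set.empty = PySem.Set.empty) :
    ∀ x, (l.foldl (fun d f => d.insert f PySem.Set.empty) d).getD x PySem.Set.empty
      = PySem.Set.empty := by
  induction l generalizing d with
  | nil => exact h
  | cons y t ih =>
    rw [List.foldl_cons]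
    refine ih _ (fun x => ?_)
    by_cases hx : x = y
    · subst hx; rw [PySem.Dict.getD_insert_self]
    · rw [PySem.Dict.getD_insert_of_ne _ _ _ hx]; exact h x

theorem B_eq_ref (friends gifts : List String)
    (hnd : friends.Nodup)
    (hg : ∀ g ∈ gifts, (PySem.Str.split₀ g).length = 2 ∧ ∀ x ∈ PySem.Str.split₀ g, x ∈ friends) :
    solution_alt friends gifts = pvRef friends gifts := by
  obtain ⟨hS, hD, hP, hPn, hK⟩ := B_state gifts (fun g h => (hg g h).1)
    (friends.foldl (fun d f => d.insert f 0) PySem.Dict.empty, PySem.Dict.empty,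
     friends.foldl (fun d f => d.insert f PySem.Set.empty) PySem.Dict.empty)
  set st := gifts.foldl pyBStep
    (friends.foldl (fun d f => d.insert f 0) PySem.Dict.empty, PySem.Dict.empty,
     friends.foldl (fun d f => d.insert f PySem.Set.empty) PySem.Dict.empty) with hst
  have hscore : ∀ z, st.1.getD z 0 = pvGP gifts z := by
    intro z
    rw [hS z, getD_foldl_insert0 _ _ (fun _ => rfl) z]
    simp [pvGP]
  have hdirect : ∀ a b, st.2.1.getD (a, b) 0 = pvC gifts a b := by
    intro a b; rw [hD a b]; simp
  have hkeys : st.1.keys = friends := by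
    rw [hK (by
      intro g hg' t ht
      rw [keys_insert_any friends hnd (0 : Int)]
      exact (hg g hg').2 t ht)]
    exact keys_insert_any friends hnd 0
  have hvals : st.1.values = friends.map (fun z => pvGP gifts z) := by
    rw [dict_values_getD st.1 (by rw [hkeys]; exact hnd), hkeys]
    exact List.map_congr_left (fun z _ => hscore z)
  have hpart0 : ∀ x, (friends.foldl (fun d f => d.insert f PySem.Set.empty)
      (PySem.Dict.empty : PySem.Dict String (PySem.Set String))).getD x PySem.Set.empty
      = PySem.Set.empty :=
    getD_foldl_insert_empty friends _ (fun _ => rfl)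
  have hmemP : ∀ x y, y ∈ st.2.2.getD x PySem.Set.empty
      ↔ pvC gifts x y > 0 ∨ pvC gifts y x > 0 := by
    intro x y
    rw [hP x y, hpart0 x]
    constructor
    · rintro (h | h)
      · exact absurd h (by simp [PySem.Set.empty])
      · exact h
    · exact Or.inr
  have hnodupP : ∀ x, (st.2.2.getD x PySem.Set.empty).Nodup :=
    hPn (fun x => by rw [hpart0 x]; simp [PySem.Set.empty])
  -- the sorted score list
  set svals := PySem.List.sorted st.1.values (fun v => v) false with hsvals
  have hperm : svals.Perm st.1.values := PySem.List.sorted_perm _ _ _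
  have hpair : svals.Pairwise (· ≤ ·) := by
    have := PySem.List.sorted_pairwise st.1.values (fun v => v)
    simpa using this
  have hrank : ∀ x ∈ friends,
      ((PySem.List.enumerate svals 0).foldl pyRankStep PySem.Dict.empty).getD
        (st.1.getD x 0) 0
      = (friends.countP (fun y => decide (pvGP gifts y < pvGP gifts x)) : Int) := by
    intro x hx
    have hvmem : st.1.getD x 0 ∈ svals := by
      rw [hperm.mem_iff, hvals, hscore x]
      exact List.mem_map_of_mem hx
    rw [rank_first svals 0 PySem.Dict.empty _ hvmem (by simp) hpair]
    rw [hperm.countP_eq, hvals, List.countP_map, hscore x]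
    simp [Function.comp_def]
  simp only [solution_alt]
  rw [← hst]
  unfold pvRef
  apply PySem.List.foldl_congr_mem
  intro best x hx
  congr 1
  rw [inner_fold st.1 st.2.1 gifts x hscore hdirect _ _, hrank x hx]
  -- transfer the two partner counts to counts over friends
  have htrans : ∀ (p : String → Bool), (∀ y, p y = true → ¬ pvC gifts x y = pvC gifts y x) →
      (st.2.2.getD x PySem.Set.empty).countP p = friends.countP p := by
    intro p hp
    apply countP_eq_of_nodup _ _ _ (hnodupP x) hnd
    intro y hy
    have hne := hp y hy
    have hCnn : 0 ≤ pvC gifts x y := by simp [pvC]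
    have hCnn' : 0 ≤ pvC gifts y x := by simp [pvC]
    have hpos : pvC gifts x y > 0 ∨ pvC gifts y x > 0 := by omega
    have hyf : y ∈ friends := by
      rcases hpos with h | h
      · exact (C_pos_mem friends gifts hg x y h).2
      · exact (C_pos_mem friends gifts hg y x h).1
    have hyp : y ∈ st.2.2.getD x PySem.Set.empty := (hmemP x y).mpr hpos
    exact ⟨fun _ => hyf, fun _ => hyp⟩
  rw [htrans _ (by
      intro y hy
      simp only [Bool.and_eq_true, Bool.not_eq_eq_eq_not, Bool.not_true, beq_eq_false_iff_ne,
        ne_eq] at hy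
      exact hy.1.2),
    htrans _ (by
      intro y hy
      simp only [Bool.and_eq_true, Bool.not_eq_eq_eq_not, Bool.not_true, beq_eq_false_iff_ne,
        ne_eq] at hy
      exact hy.1.2)]
  -- combine the three counts into A's single pairwise count
  unfold pvCnt
  apply count_combine
  intro y _
  by_cases h1 : y = x
  · subst h1; simp [pvBeat]
  · have hx1 : (y == x) = false := by simp [h1]
    simp only [hx1, Bool.not_false, Bool.true_and]
    by_cases h2 : pvC gifts x y = pvC gifts y x
    · have : (pvC gifts x y == pvC gifts y x) = true := by simp [h2]
      simp only [this, Bool.not_true, Bool.false_and, pvBeat]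
      by_cases h4 : pvGP gifts y < pvGP gifts x
      · simp [h2, h4, lt_irrefl, gt_iff_lt]
      · have h4' : ¬ pvGP gifts x > pvGP gifts y := by omega
        simp [h2, h4, h4', gt_iff_lt, lt_irrefl]
    · have : (pvC gifts x y == pvC gifts y x) = false := by simp [h2]
      simp only [this, Bool.not_false, Bool.true_and, pvBeat]
      by_cases h3 : pvC gifts x y > pvC gifts y x <;>
        by_cases h4 : pvGP gifts x > pvGP gifts y <;>
          have h4' : (pvGP gifts y < pvGP gifts x) = (pvGP gifts x > pvGP gifts y) := rfl <;>
          simp [h2, h3, h4, gt_iff_lt] <;> omega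

-- ===== VERDICT (by name: the statement is the Claim_ definition above) =====
theorem solution_spec : Claim_equal_solution := by
  intro friends gifts _ hpre
  unfold Spec_solution
  rw [A_eq_ref friends gifts hpre.1 hpre.2, B_eq_ref friends gifts hpre.1 hpre.2]
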